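-- pv_equiv track=rewrite | github.com/Milobe115/AoC-2023 | day13/star2.py | find_pattern_score
-- ===== SOURCE A (Python) =====
-- def find_pattern_score(pattern, allowed_errors=0):
--     for col in range(len(pattern[0]) - 1):
--         errors = 0
--         for split_col in range(len(pattern[0])):
--             left = col - split_col
--             right = col + 1 + split_col
--             if 0 <= left < right < len(pattern[0]):
--                 for row in range(len(pattern)):
--                     if pattern[row][left] != pattern[row][right]:
--                         errors += 1
--         if errors == allowed_errors:
--             return col + 1
--
--     for row in range(len(pattern) - 1):
--         errors = 0
--         for split_row in range(len(pattern)):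
--             up = row - split_row
--             down = row + 1 + split_row
--             if 0 <= up < down < len(pattern):
--                 for col in range(len(pattern[0])):
--                     if pattern[up][col] != pattern[down][col]:
--                         errors += 1
--         if errors == allowed_errors:
--             return (row + 1) * 100
-- ===== SOURCE B (Python) =====
-- def find_pattern_score(pattern, allowed_errors=0):
--     n = len(pattern)
--     w = len(pattern[0])
--
--     # mismatch table over anti-diagonals: col_bucket[s] = total cell mismatches
--     # between columns i and j summed over all pairs i < j with i + j = s;
--     # a vertical mirror between columns p and p+1 has total error col_bucket[2*p+1].
--     col_bucket = [0] * (2 * w)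
--     for i in range(w):
--         for j in range(i + 1, w):
--             col_bucket[i + j] += sum(row[i] != row[j] for row in pattern)
--     for p in range(w - 1):
--         if col_bucket[2 * p + 1] == allowed_errors:
--             return p + 1
--
--     row_bucket = [0] * (2 * n)
--     for i in range(n):
--         for j in range(i + 1, n):
--             row_bucket[i + j] += sum(pattern[i][c] != pattern[j][c] for c in range(w))
--     for p in range(n - 1):
--         if row_bucket[2 * p + 1] == allowed_errors:
--             return (p + 1) * 100
-- ===== Notes on version B (the rewrite author's own statement) =====
-- stated objective: alternative
-- what changed: Replaces A's per-split outward expansion (re-scanning mirrored pairs for every candidate axis) with a precomputed anti-diagonal mismatch table: one pass over all column pairs (and all row pairs) accumulates cell mismatches into bucket[i+j], after which a mirror between positions p and p+1 is just the lookup bucket[2p+1] == allowed_errors; B has no early exit, so it can be slower than A when an early split matches.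
-- outside the precondition, e.g. on find_pattern_score(['aabcd', 'aa'], 0): A returns 1, B raises IndexError; on find_pattern_score(['ab', 'a'], 0): A raises IndexError, B raises IndexError
import Mathlib
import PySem

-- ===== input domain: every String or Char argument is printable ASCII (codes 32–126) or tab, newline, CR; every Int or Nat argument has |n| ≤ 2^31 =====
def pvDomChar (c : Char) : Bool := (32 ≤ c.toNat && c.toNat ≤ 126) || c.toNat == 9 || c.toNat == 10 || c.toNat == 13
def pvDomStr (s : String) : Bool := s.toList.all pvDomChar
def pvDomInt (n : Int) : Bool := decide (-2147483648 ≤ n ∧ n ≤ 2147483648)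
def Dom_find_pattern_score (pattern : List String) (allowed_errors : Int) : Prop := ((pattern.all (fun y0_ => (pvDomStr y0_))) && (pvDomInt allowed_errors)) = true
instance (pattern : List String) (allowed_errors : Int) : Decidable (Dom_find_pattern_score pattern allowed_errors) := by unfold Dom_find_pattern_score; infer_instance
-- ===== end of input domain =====

-- B replaces A's per-split outward expansion by a precomputed anti-diagonal mismatch
-- table (bucket[i+j] accumulates pair mismatches; split p looks up bucket[2p+1]);
-- objective: alternative — no speed claim: B always builds the full pair table,
-- where A can return as soon as an early split matches.


-- ===== PORT A =====
-- pattern[row][i] / pattern[i]; exact (pyGet? returns some) whenever Pre_ holds for the indices used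
def pvCharAtA (s : List Char) (i : Int) : Char := (PySem.List.pyGet? s i).getD ' '
def pvRowAtA (rows : List (List Char)) (i : Int) : List Char := (PySem.List.pyGet? rows i).getD []

-- errors for a column split at `col` (A's first inner double loop)
def pvErrsColA (rows : List (List Char)) (w : Nat) (col : Nat) : Int :=
  (List.range w).foldl (fun e (sc : Nat) =>
    if 0 ≤ (col : Int) - sc ∧ (col : Int) - sc < (col : Int) + 1 + sc ∧ (col : Int) + 1 + sc < (w : Int) then
      rows.foldl (fun e2 r =>
        if pvCharAtA r ((col : Int) - sc) ≠ pvCharAtA r ((col : Int) + 1 + sc) then e2 + 1 else e2) e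
    else e) 0

-- errors for a row split at `row` (A's second inner double loop)
def pvErrsRowA (rows : List (List Char)) (w : Nat) (row : Nat) : Int :=
  (List.range rows.length).foldl (fun e (sr : Nat) =>
    if 0 ≤ (row : Int) - sr ∧ (row : Int) - sr < (row : Int) + 1 + sr ∧ (row : Int) + 1 + sr < (rows.length : Int) then
      (List.range w).foldl (fun e2 (c : Nat) =>
        if pvCharAtA (pvRowAtA rows ((row : Int) - sr)) (c : Int) ≠ pvCharAtA (pvRowAtA rows ((row : Int) + 1 + sr)) (c : Int) then e2 + 1 else e2) e
    else e) 0

-- A's first for-loop with early return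
def pvLoopColA (rows : List (List Char)) (w : Nat) (allowed : Int) : List Nat → Option Int
  | [] => none
  | c :: cs => if pvErrsColA rows w c = allowed then some ((c : Int) + 1) else pvLoopColA rows w allowed cs

-- A's second for-loop with early return
def pvLoopRowA (rows : List (List Char)) (w : Nat) (allowed : Int) : List Nat → Option Int
  | [] => none
  | r :: rs => if pvErrsRowA rows w r = allowed then some (((r : Int) + 1) * 100) else pvLoopRowA rows w allowed rs

def find_pattern_score (pattern : List String) (allowed_errors : Int) : Option Int :=
  let rows := pattern.map (fun s => s.toList)
  let w := (rows.headD []).length          -- len(pattern[0]); Pre_ gives pattern ≠ []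
  match pvLoopColA rows w allowed_errors (List.range (w - 1)) with
  | some v => some v
  | none => pvLoopRowA rows w allowed_errors (List.range (rows.length - 1))

-- ===== PORT B =====
-- row[i] with a nonnegative index; exact (pyGet? returns some) whenever Pre_ holds for the indices used
def pvAtB (s : List Char) (i : Nat) : Char := (PySem.List.pyGet? s (i : Int)).getD ' '
def pvRowB (rows : List (List Char)) (i : Nat) : List Char := (PySem.List.pyGet? rows (i : Int)).getD []

-- sum(row[i] != row[j] for row in pattern)
def pvColDiffB (rows : List (List Char)) (i j : Nat) : Int :=
  rows.foldl (fun c r => c + (if pvAtB r i != pvAtB r j then 1 else 0)) 0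

-- sum(pattern[i][c] != pattern[j][c] for c in range(w))
def pvRowDiffB (rows : List (List Char)) (w i j : Nat) : Int :=
  (List.range w).foldl (fun c col =>
    c + (if pvAtB (pvRowB rows i) col != pvAtB (pvRowB rows j) col then 1 else 0)) 0

-- bucket = [0]*(2*m); for i in range(m): for j in range(i+1, m): bucket[i+j] += diff(i, j)
-- (range(i+1, m) is List.range' (i+1) (m-(i+1)), the list [i+1, …, m-1])
def pvBucketsB (m : Nat) (diff : Nat → Nat → Int) : List Int :=
  (List.range m).foldl (fun b i =>
    (List.range' (i + 1) (m - (i + 1))).foldl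
      (fun b' j => b'.set (i + j) (b'.getD (i + j) 0 + diff i j)) b)
    (List.replicate (2 * m) 0)

-- for p in range(k): if bucket[2*p+1] == allowed: return p+1
def pvScanB (bucket : List Int) (allowed : Int) : List Nat → Option Int
  | [] => none
  | p :: ps => if bucket.getD (2 * p + 1) 0 = allowed then some ((p : Int) + 1) else pvScanB bucket allowed ps

def find_pattern_score_alt (pattern : List String) (allowed_errors : Int) : Option Int :=
  let rows := pattern.map (fun s => s.toList)
  let n := rows.length
  let w := (rows.headD []).length
  match pvScanB (pvBucketsB w (pvColDiffB rows)) allowed_errors (List.range (w - 1)) with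
  | some v => some v
  | none =>
    match pvScanB (pvBucketsB n (fun i j => pvRowDiffB rows w i j)) allowed_errors (List.range (n - 1)) with
    | some v => some (v * 100)
    | none => none

-- ===== PRECONDITION & SPEC =====
-- Pre_ excludes the empty grid (A raises IndexError on pattern[0]) and ragged grids with a
-- row shorter than the first row, on which A raises IndexError on most inputs but can return
-- a score computed from early splits before touching the short row (see claim cites); B's
-- pair table touches every column pair and raises there.
def Pre_find_pattern_score (pattern : List String) (allowed_errors : Int) : Prop :=
  pattern ≠ [] ∧ ∀ s ∈ pattern, (pattern.headD "").toList.length ≤ s.toList.length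
instance (pattern : List String) (allowed_errors : Int) : Decidable (Pre_find_pattern_score pattern allowed_errors) := by unfold Pre_find_pattern_score; infer_instance
def pvWitness_find_pattern_score : List String × Int := (["#.", "#."], 0)

def Spec_find_pattern_score (pattern : List String) (allowed_errors : Int) (out : Option Int) : Prop := out = find_pattern_score_alt pattern allowed_errors
instance (pattern : List String) (allowed_errors : Int) (out : Option Int) : Decidable (Spec_find_pattern_score pattern allowed_errors out) := by unfold Spec_find_pattern_score; infer_instance

-- ===== CLAIM (what is proved, stated in full; the proofs are below) =====
def Claim_equal_find_pattern_score : Prop := ∀ (pattern : List String) (allowed_errors : Int), Dom_find_pattern_score pattern allowed_errors → Pre_find_pattern_score pattern allowed_errors → Spec_find_pattern_score pattern allowed_errors (find_pattern_score pattern allowed_errors)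

-- ===== LEMMAS AND PROOFS =====

theorem pvCharAtA_natCast (r : List Char) (n : Nat) : pvCharAtA r (n : Int) = r.getD n ' ' := by
  simp [pvCharAtA, PySem.List.pyGet?_natCast, List.getD_eq_getElem?_getD]

theorem pvAtB_eq (r : List Char) (n : Nat) : pvAtB r n = r.getD n ' ' := by
  simp [pvAtB, PySem.List.pyGet?_natCast, List.getD_eq_getElem?_getD]

theorem pvRowAtA_natCast (rows : List (List Char)) (n : Nat) : pvRowAtA rows (n : Int) = rows.getD n [] := by
  simp [pvRowAtA, PySem.List.pyGet?_natCast, List.getD_eq_getElem?_getD]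

theorem pvRowB_eq (rows : List (List Char)) (n : Nat) : pvRowB rows n = rows.getD n [] := by
  simp [pvRowB, PySem.List.pyGet?_natCast, List.getD_eq_getElem?_getD]

-- a guarded range-fold is the sum over the prefix where the guard holds
theorem pvFoldGuardSum (g : Nat → Int) (t N : Nat) (ht : t ≤ N)
    (c : Nat → Prop) [DecidablePred c] (hc : ∀ sc, c sc ↔ sc < t) :
    (List.range N).foldl (fun e sc => if c sc then e + g sc else e) 0
      = ((List.range t).map g).sum := by
  have hsplit : N = t + (N - t) := by omega
  rw [hsplit, List.range_add, List.foldl_append]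
  have h1 : (List.range t).foldl (fun e sc => if c sc then e + g sc else e) 0
      = ((List.range t).map g).sum := by
    rw [PySem.List.foldl_congr_mem (List.range t) _ (fun e sc => e + g sc) 0
        (by intro acc x hx; rw [if_pos ((hc x).2 (List.mem_range.mp hx))])]
    simpa using PySem.List.foldl_add (List.range t) g 0
  rw [h1]
  rw [PySem.List.foldl_congr_mem _ _ (fun e sc => e + (fun _ => (0:Int)) sc) _
      (by
        intro acc x hx
        simp only [List.mem_map, List.mem_range] at hx
        obtain ⟨y, _, rfl⟩ := hx
        rw [if_neg]
        · simp
        · intro hcx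
          have := (hc _).1 hcx
          omega)]
  rw [PySem.List.foldl_add]
  have hz : (List.map (fun (_ : Nat) => (0:Int)) ((List.range (N - t)).map (fun x => t + x))).sum = 0 :=
    List.sum_eq_zero (by simp)
  rw [hz, add_zero]

-- A's column-split error count as a sum of per-pair mismatch counts
theorem pvErrsColA_sum (rows : List (List Char)) (w p : Nat) :
    pvErrsColA rows w p
      = ((List.range (min (p + 1) (w - (p + 1)))).map (fun j =>
          (List.countP (fun r => r.getD (p - j) ' ' != r.getD (p + 1 + j) ' ') rows : Int))).sum := by
  unfold pvErrsColA
  refine Eq.trans (PySem.List.foldl_congr_mem (List.range w) _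
      (fun e sc => if 0 ≤ (p:Int) - sc ∧ (p:Int) - sc < (p:Int) + 1 + sc ∧ (p:Int) + 1 + sc < (w:Int)
        then e + (List.countP (fun r => r.getD (p - sc) ' ' != r.getD (p + 1 + sc) ' ') rows : Int)
        else e) 0 ?_) ?_
  · intro acc sc _
    beta_reduce
    by_cases h : 0 ≤ (p:Int) - sc ∧ (p:Int) - sc < (p:Int) + 1 + sc ∧ (p:Int) + 1 + sc < (w:Int)
    · rw [if_pos h, if_pos h]
      obtain ⟨ha, -, -⟩ := h
      have e1 : ((p - sc : Nat) : Int) = (p : Int) - sc := by omega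
      have e2 : ((p + 1 + sc : Nat) : Int) = (p : Int) + 1 + sc := by push_cast; ring
      rw [← e1, ← e2]
      simp only [pvCharAtA_natCast]
      simpa [bne_iff_ne] using
        PySem.List.foldl_count_if (fun r => r.getD (p - sc) ' ' != r.getD (p + 1 + sc) ' ') rows acc
    · rw [if_neg h, if_neg h]
  · exact pvFoldGuardSum _ _ _ (by omega) _ (by intro sc; omega)

-- A's row-split error count as a sum of per-pair mismatch counts
theorem pvErrsRowA_sum (rows : List (List Char)) (w p : Nat) :
    pvErrsRowA rows w p
      = ((List.range (min (p + 1) (rows.length - (p + 1)))).map (fun j =>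
          (List.countP (fun c => (rows.getD (p - j) []).getD c ' ' != (rows.getD (p + 1 + j) []).getD c ' ')
            (List.range w) : Int))).sum := by
  unfold pvErrsRowA
  refine Eq.trans (PySem.List.foldl_congr_mem (List.range rows.length) _
      (fun e sr => if 0 ≤ (p:Int) - sr ∧ (p:Int) - sr < (p:Int) + 1 + sr ∧ (p:Int) + 1 + sr < (rows.length:Int)
        then e + (List.countP (fun c => (rows.getD (p - sr) []).getD c ' ' != (rows.getD (p + 1 + sr) []).getD c ' ') (List.range w) : Int)
        else e) 0 ?_) ?_
  · intro acc sr _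
    beta_reduce
    by_cases h : 0 ≤ (p:Int) - sr ∧ (p:Int) - sr < (p:Int) + 1 + sr ∧ (p:Int) + 1 + sr < (rows.length:Int)
    · rw [if_pos h, if_pos h]
      obtain ⟨ha, -, -⟩ := h
      have e1 : ((p - sr : Nat) : Int) = (p : Int) - sr := by omega
      have e2 : ((p + 1 + sr : Nat) : Int) = (p : Int) + 1 + sr := by push_cast; ring
      rw [← e1, ← e2]
      simp only [pvRowAtA_natCast, pvCharAtA_natCast]
      simpa [bne_iff_ne] using
        PySem.List.foldl_count_if (fun c => (rows.getD (p - sr) []).getD c ' ' != (rows.getD (p + 1 + sr) []).getD c ' ') (List.range w) acc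
    · rw [if_neg h, if_neg h]
  · exact pvFoldGuardSum _ _ _ (by omega) _ (by intro sr; omega)

-- B's per-pair diffs as counts
theorem pvColDiffB_count (rows : List (List Char)) (i j : Nat) :
    pvColDiffB rows i j = (List.countP (fun r => r.getD i ' ' != r.getD j ' ') rows : Int) := by
  unfold pvColDiffB
  rw [PySem.List.foldl_congr_mem rows _
      (fun c r => if (fun r => r.getD i ' ' != r.getD j ' ') r then c + 1 else c) 0
      (by intro acc r _; beta_reduce; simp only [pvAtB_eq]; split <;> ring)]
  simpa using PySem.List.foldl_count_if (fun r => r.getD i ' ' != r.getD j ' ') rows 0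

theorem pvRowDiffB_count (rows : List (List Char)) (w i j : Nat) :
    pvRowDiffB rows w i j
      = (List.countP (fun c => (rows.getD i []).getD c ' ' != (rows.getD j []).getD c ' ') (List.range w) : Int) := by
  unfold pvRowDiffB
  rw [PySem.List.foldl_congr_mem (List.range w) _
      (fun c col => if (fun col => (rows.getD i []).getD col ' ' != (rows.getD j []).getD col ' ') col then c + 1 else c) 0
      (by intro acc col _; beta_reduce; simp only [pvAtB_eq, pvRowB_eq]; split <;> ring)]
  simpa using PySem.List.foldl_count_if
    (fun c => (rows.getD i []).getD c ' ' != (rows.getD j []).getD c ' ') (List.range w) 0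

-- updating one cell of the table, seen through getD
theorem pvSetAddGetD (b : List Int) (idx s : Nat) (hs : s < b.length) (v : Int) :
    (b.set idx (b.getD idx 0 + v)).getD s 0 = b.getD s 0 + (if idx = s then v else 0) := by
  by_cases h : idx = s
  · subst h
    simp [List.getD_eq_getElem?_getD, List.getElem?_set_self hs]
  · simp [List.getD_eq_getElem?_getD, List.getElem?_set_ne h, h]

-- folding the whole pair list: the table entry at s is the sum of matching contributions
theorem pvFoldSetAdd (diff : Nat → Nat → Int) (ps : List (Nat × Nat)) :
    ∀ (b : List Int) (s : Nat), s < b.length →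
    (ps.foldl (fun b' q => b'.set (q.1 + q.2) (b'.getD (q.1 + q.2) 0 + diff q.1 q.2)) b).getD s 0
      = b.getD s 0 + (ps.map (fun q => if q.1 + q.2 = s then diff q.1 q.2 else 0)).sum := by
  induction ps with
  | nil => intro b s hs; simp
  | cons q qs ih =>
    intro b s hs
    simp only [List.foldl_cons, List.map_cons, List.sum_cons]
    rw [ih _ s (by simpa using hs), pvSetAddGetD b _ s hs]
    ring

-- the indicator sum over one row of the pair list picks the single contribution
theorem pvIndicatorRange' (diff : Nat → Nat → Int) (i s : Nat) :
    ∀ (len a : Nat),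
    ((List.range' a len).map (fun j => if i + j = s then diff i j else 0)).sum
      = if a ≤ s - i ∧ s - i < a + len ∧ i ≤ s then diff i (s - i) else 0 := by
  intro len
  induction len with
  | zero =>
    intro a
    rw [if_neg (by omega)]
    simp
  | succ len ih =>
    intro a
    rw [List.range'_succ, List.map_cons, List.sum_cons, ih (a + 1)]
    by_cases h : i + a = s
    · have h1 : s - i = a := by omega
      have hno : ¬ (a + 1 ≤ s - i ∧ s - i < a + 1 + len ∧ i ≤ s) := by omega
      have hyes : a ≤ s - i ∧ s - i < a + (len + 1) ∧ i ≤ s := by omega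
      rw [if_pos h, if_neg hno, if_pos hyes]
      simp [h1]
    · rw [if_neg h]
      by_cases h2 : a + 1 ≤ s - i ∧ s - i < a + 1 + len ∧ i ≤ s
      · have hyes : a ≤ s - i ∧ s - i < a + (len + 1) ∧ i ≤ s := by omega
        rw [if_pos h2, if_pos hyes]
        ring
      · have hno : ¬ (a ≤ s - i ∧ s - i < a + (len + 1) ∧ i ≤ s) := by omega
        rw [if_neg h2, if_neg hno]
        ring

-- list range sums as Finset sums
theorem pvSumRange (f : Nat → Int) (n : Nat) :
    ((List.range n).map f).sum = ∑ i ∈ Finset.range n, f i := by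
  induction n with
  | zero => simp
  | succ n ih => simp [List.range_succ, Finset.sum_range_succ, ih]

-- sum over a flatMap is the sum of the per-block sums
theorem pvSumFlatMap {a b : Type} (l : List a) (f : a -> List b) (g : b -> Int) :
    ((l.flatMap f).map g).sum = (l.map (fun x => ((f x).map g).sum)).sum := by
  induction l with
  | nil => simp
  | cons x xs ih => simp [List.flatMap_cons, ih]

-- the table entry at s, fully characterized
theorem pvBucketsB_getD (m : Nat) (diff : Nat → Nat → Int) (s : Nat) (hs : s < 2 * m) :
    (pvBucketsB m diff).getD s 0
      = ((List.range m).map (fun i =>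
          if i + 1 ≤ s - i ∧ s - i < m ∧ i ≤ s then diff i (s - i) else 0)).sum := by
  have hfe : pvBucketsB m diff
      = ((List.range m).flatMap (fun i => (List.range' (i + 1) (m - (i + 1))).map (fun j => (i, j)))).foldl
          (fun b' (q : Nat × Nat) => b'.set (q.1 + q.2) (b'.getD (q.1 + q.2) 0 + diff q.1 q.2))
          (List.replicate (2 * m) 0) := by
    unfold pvBucketsB
    rw [List.foldl_flatMap]
    refine (List.foldl_ext _ _ _ ?_).symm
    intro acc i _
    rw [List.foldl_map]
  rw [hfe]
  rw [pvFoldSetAdd diff _ _ s (by simpa using hs)]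
  rw [List.getD_eq_getElem?_getD, List.getElem?_replicate, if_pos hs]
  simp only [Option.getD_some, zero_add]
  rw [pvSumFlatMap]
  apply congrArg List.sum
  apply List.map_congr_left
  intro i hi
  rw [List.mem_range] at hi
  have hc : ((List.range' (i + 1) (m - (i + 1))).map (fun j => (i, j))).map
        (fun q : Nat × Nat => if q.1 + q.2 = s then diff q.1 q.2 else 0)
      = (List.range' (i + 1) (m - (i + 1))).map (fun j => if i + j = s then diff i j else 0) := by
    rw [List.map_map]; rfl
  rw [hc, pvIndicatorRange' diff i s (m - (i + 1)) (i + 1)]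
  by_cases h : i + 1 ≤ s - i ∧ s - i < m ∧ i ≤ s
  · rw [if_pos ⟨h.1, by omega, h.2.2⟩, if_pos h]
  · rw [if_neg (by omega), if_neg h]

-- the anti-diagonal sum at s = 2p+1 is exactly A's outward sum (reindexed i = p - k)
theorem pvDiagSum (m p : Nat) (hp : p + 1 < m) (g : Nat → Nat → Int) :
    ((List.range m).map (fun i =>
        if i + 1 ≤ (2 * p + 1) - i ∧ (2 * p + 1) - i < m ∧ i ≤ 2 * p + 1 then g i ((2 * p + 1) - i) else 0)).sum
      = ((List.range (min (p + 1) (m - (p + 1)))).map (fun k => g (p - k) (p + 1 + k))).sum := by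
  classical
  rw [pvSumRange, pvSumRange, ← Finset.sum_filter]
  refine Finset.sum_nbij' (fun i => p - i) (fun k => p - k) ?_ ?_ ?_ ?_ ?_
  · intro i hi
    simp only [Finset.mem_filter, Finset.mem_range] at hi
    simp only [Finset.mem_range, Nat.lt_min]
    omega
  · intro k hk
    simp only [Finset.mem_range, Nat.lt_min] at hk
    simp only [Finset.mem_filter, Finset.mem_range]
    omega
  · intro i hi
    simp only [Finset.mem_filter, Finset.mem_range] at hi
    show p - (p - i) = i
    omega
  · intro k hk
    simp only [Finset.mem_range, Nat.lt_min] at hk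
    show p - (p - k) = k
    omega
  · intro i hi
    simp only [Finset.mem_filter, Finset.mem_range] at hi
    have h1 : (2 * p + 1) - i = p + 1 + (p - i) := by omega
    have h2 : p - (p - i) = i := by omega
    beta_reduce
    rw [h1, h2]

-- column splits: A's error count is B's table lookup
theorem pvColAgree (rows : List (List Char)) (w p : Nat) (hp : p + 1 < w) :
    pvErrsColA rows w p = (pvBucketsB w (pvColDiffB rows)).getD (2 * p + 1) 0 := by
  rw [pvErrsColA_sum, pvBucketsB_getD w _ (2 * p + 1) (by omega),
    pvDiagSum w p hp (fun i j => pvColDiffB rows i j)]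
  apply congrArg List.sum
  apply List.map_congr_left
  intro k hk
  rw [List.mem_range] at hk
  rw [pvColDiffB_count]

-- row splits: A's error count is B's table lookup
theorem pvRowAgree (rows : List (List Char)) (w p : Nat) (hp : p + 1 < rows.length) :
    pvErrsRowA rows w p = (pvBucketsB rows.length (fun i j => pvRowDiffB rows w i j)).getD (2 * p + 1) 0 := by
  rw [pvErrsRowA_sum, pvBucketsB_getD rows.length _ (2 * p + 1) (by omega),
    pvDiagSum rows.length p hp (fun i j => pvRowDiffB rows w i j)]
  apply congrArg List.sum
  apply List.map_congr_left
  intro k hk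
  rw [List.mem_range] at hk
  rw [pvRowDiffB_count]

-- A's first loop is B's scan of the column table
theorem pvLoopColScan (rows : List (List Char)) (w : Nat) (allowed : Int) :
    ∀ ps : List Nat, (∀ q ∈ ps, pvErrsColA rows w q = (pvBucketsB w (pvColDiffB rows)).getD (2 * q + 1) 0) →
    pvLoopColA rows w allowed ps = pvScanB (pvBucketsB w (pvColDiffB rows)) allowed ps := by
  intro ps
  induction ps with
  | nil => intro _; rfl
  | cons q qs ih =>
    intro h
    simp only [pvLoopColA, pvScanB, h q (by simp)]
    split
    · rfl
    · exact ih (fun r hr => h r (by simp [hr]))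

-- A's second loop is B's scan of the row table, times 100
theorem pvLoopRowScan (rows : List (List Char)) (w : Nat) (allowed : Int) :
    ∀ ps : List Nat, (∀ q ∈ ps, pvErrsRowA rows w q = (pvBucketsB rows.length (fun i j => pvRowDiffB rows w i j)).getD (2 * q + 1) 0) →
    pvLoopRowA rows w allowed ps
      = Option.map (fun r => r * 100) (pvScanB (pvBucketsB rows.length (fun i j => pvRowDiffB rows w i j)) allowed ps) := by
  intro ps
  induction ps with
  | nil => intro _; rfl
  | cons q qs ih =>
    intro h
    simp only [pvLoopRowA, pvScanB, h q (by simp)]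
    split
    · rfl
    · exact ih (fun r hr => h r (by simp [hr]))

-- ===== VERDICT (by name: the statement is the Claim_ definition above) =====
theorem find_pattern_score_spec : Claim_equal_find_pattern_score := by
  intro pattern allowed _hDom _hPre
  unfold Spec_find_pattern_score
  set rows := pattern.map (fun s => s.toList) with hrows
  simp only [find_pattern_score, find_pattern_score_alt, ← hrows]
  rw [pvLoopColScan rows ((rows.headD []).length) allowed (List.range ((rows.headD []).length - 1))
      (fun q hq => pvColAgree rows _ q (by rw [List.mem_range] at hq; omega)),
    pvLoopRowScan rows ((rows.headD []).length) allowed (List.range (rows.length - 1))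
      (fun q hq => pvRowAgree rows _ q (by rw [List.mem_range] at hq; omega))]
  cases pvScanB (pvBucketsB ((rows.headD []).length) (pvColDiffB rows)) allowed
      (List.range ((rows.headD []).length - 1)) with
  | some v => rfl
  | none =>
    cases pvScanB (pvBucketsB rows.length (fun i j => pvRowDiffB rows ((rows.headD []).length) i j)) allowed
        (List.range (rows.length - 1)) with
    | some v => rfl
    | none => rfl
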